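-- pv_equiv track=rewrite | github.com/skrcka/BAAD | cv_3.py | semi_global_alignment
-- ===== SOURCE A (Python) =====
-- def semi_global_alignment(str1: str, str2: str) -> (int, str):
--     rows, cols = len(str1) + 1, len(str2) + 1
--     matrix = [[0 for _ in range(cols)] for _ in range(rows)]
--     backtrack = [['' for _ in range(cols)] for _ in range(rows)]
--
--     for i in range(1, rows):
--         matrix[i][0] = 0
--         backtrack[i][0] = 'U'
--
--     for j in range(1, cols):
--         matrix[0][j] = matrix[0][j-1] - 2
--         backtrack[0][j] = 'L'
--
--     for i in range(1, rows):
--         for j in range(1, cols):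
--             match = matrix[i-1][j-1] + (1 if str1[i-1] == str2[j-1] else -1)
--             delete = matrix[i-1][j] - 2
--             insert = matrix[i][j-1] - 2
--             matrix[i][j] = max(match, delete, insert)
--
--             if matrix[i][j] == match:
--                 backtrack[i][j] = 'D'
--             elif matrix[i][j] == delete:
--                 backtrack[i][j] = 'U'
--             else:
--                 backtrack[i][j] = 'L'
--
--     max_j = max(range(cols), key=lambda j: matrix[rows-1][j])
--     cigar = []
--     i, j = rows - 1, max_j
--     while i > 0 or j > 0:
--         if backtrack[i][j] == 'D':
--             if str1[i-1] == str2[j-1]: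
--                 cigar.append('M')
--             else:
--                 cigar.append('X')
--             i -= 1
--             j -= 1
--         elif backtrack[i][j] == 'U':
--             cigar.append('D')
--             i -= 1
--         else:
--             cigar.append('I')
--             j -= 1
--
--     cigar = ''.join(cigar[::-1])
--     return matrix[rows-1][max_j], cigar
-- ===== SOURCE B (Python) =====
-- def semi_global_alignment(str1: str, str2: str) -> (int, str):
--     # Forward propagation: each DP cell carries (score, cigar-so-far); no
--     # backtrack matrix and no traceback loop; only one previous row is kept.
--     n, m = len(str1), len(str2)
--     prev = [(-2 * j, 'I' * j) for j in range(m + 1)]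
--     for i in range(1, n + 1):
--         c1 = str1[i - 1]
--         cur = [(0, 'D' * i)]
--         for j in range(1, m + 1):
--             eq = c1 == str2[j - 1]
--             match = prev[j - 1][0] + (1 if eq else -1)
--             delete = prev[j][0] - 2
--             insert = cur[j - 1][0] - 2
--             if match >= delete and match >= insert:
--                 cur.append((match, prev[j - 1][1] + ('M' if eq else 'X')))
--             elif delete >= insert:
--                 cur.append((delete, prev[j][1] + 'D'))
--             else:
--                 cur.append((insert, cur[j - 1][1] + 'I'))
--         prev = cur
--     best = prev[0]
--     for cell in prev[1:]:
--         if cell[0] > best[0]: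
--             best = cell
--     return best
-- ===== Notes on version B (the rewrite author's own statement) =====
-- stated objective: alternative
-- what changed: B eliminates the backtrack matrix AND the whole traceback loop: each DP cell carries its (score, cigar-so-far) pair forward, only one previous row is kept, and the answer is the first strict-maximum cell of the last row, so the CIGAR is already built when the fill finishes.
import Mathlib
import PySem

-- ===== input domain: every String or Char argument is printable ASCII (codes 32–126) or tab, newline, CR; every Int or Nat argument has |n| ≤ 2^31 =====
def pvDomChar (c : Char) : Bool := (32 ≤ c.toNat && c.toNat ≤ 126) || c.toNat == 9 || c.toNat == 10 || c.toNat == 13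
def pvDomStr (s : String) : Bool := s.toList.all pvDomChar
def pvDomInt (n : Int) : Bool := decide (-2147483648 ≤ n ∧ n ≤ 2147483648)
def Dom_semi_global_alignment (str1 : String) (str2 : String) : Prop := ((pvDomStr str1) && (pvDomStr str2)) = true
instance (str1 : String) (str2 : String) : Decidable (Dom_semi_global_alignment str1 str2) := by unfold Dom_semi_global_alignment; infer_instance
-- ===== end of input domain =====

-- B removes A's backtrack matrix AND the traceback loop: each DP cell carries its
-- (score, cigar-so-far) forward, only the previous row is kept, and the answer is the
-- first strict-maximum cell of the last row; proved to return exactly A's (score, cigar).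


-- ===== PORT A =====
-- 2-d list access/update helpers (Python's matrix[i][j] reads / matrix[i][j] = v writes;
-- all indices used are provably in range, so plain getD/set is exact here)
def pvMget {α : Type} (d : α) (m : List (List α)) (i j : Nat) : α := (m.getD i []).getD j d

def pvMset {α : Type} (m : List (List α)) (i j : Nat) (v : α) : List (List α) :=
  m.set i ((m.getD i []).set j v)

-- the three fill loops of A (matrix and backtrack mutated together);
-- each Python for-loop is one named foldl (range(1, rows) = range' 1 (rows-1) = range' 1 len(s1))
def pvLoop1 (st : List (List Int) × List (List String)) (i : Nat) :
    List (List Int) × List (List String) :=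
  (pvMset st.1 i 0 0, pvMset st.2 i 0 "U")

def pvLoop2 (st : List (List Int) × List (List String)) (j : Nat) :
    List (List Int) × List (List String) :=
  (pvMset st.1 0 j (pvMget 0 st.1 0 (j - 1) - 2), pvMset st.2 0 j "L")

def pvCell (s1 s2 : List Char) (i : Nat) (st : List (List Int) × List (List String)) (j : Nat) :
    List (List Int) × List (List String) :=
  let mtch := pvMget 0 st.1 (i - 1) (j - 1) +
    (if s1.getD (i - 1) ' ' = s2.getD (j - 1) ' ' then 1 else -1)
  let del := pvMget 0 st.1 (i - 1) j - 2
  let ins := pvMget 0 st.1 i (j - 1) - 2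
  let v := max mtch (max del ins)
  let b := if v = mtch then "D" else if v = del then "U" else "L"
  (pvMset st.1 i j v, pvMset st.2 i j b)

def pvLoop3 (s1 s2 : List Char) (st : List (List Int) × List (List String)) (i : Nat) :
    List (List Int) × List (List String) :=
  (List.range' 1 s2.length).foldl (pvCell s1 s2 i) st

def pvMat0 (s1 s2 : List Char) : List (List Int) × List (List String) :=
  (List.replicate (s1.length + 1) (List.replicate (s2.length + 1) (0 : Int)),
   List.replicate (s1.length + 1) (List.replicate (s2.length + 1) ""))

def pvPhase1 (s1 s2 : List Char) : List (List Int) × List (List String) :=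
  (List.range' 1 s1.length).foldl pvLoop1 (pvMat0 s1 s2)

def pvPhase2 (s1 s2 : List Char) : List (List Int) × List (List String) :=
  (List.range' 1 s2.length).foldl pvLoop2 (pvPhase1 s1 s2)

def pvFillA (s1 s2 : List Char) : List (List Int) × List (List String) :=
  (List.range' 1 s1.length).foldl (pvLoop3 s1 s2) (pvPhase2 s1 s2)

-- max(range(cols), key=lambda j: row[j]): first index attaining the maximum (strict-> replaces)
def pvArgmaxA (row : List Int) (cols : Nat) : Nat :=
  (List.range' 1 (cols - 1)).foldl
    (fun b j => if row.getD j 0 > row.getD b 0 then j else b) 0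

-- the while-loop traceback of A, fuel-bounded (fuel i+j suffices; only makes it total)
def pvWalkA (s1 s2 : List Char) (bt : List (List String)) :
    Nat → Nat → Nat → List String → List String
  | 0, _, _, acc => acc
  | fuel + 1, i, j, acc =>
    if i = 0 ∧ j = 0 then acc
    else if pvMget "" bt i j = "D" then
      pvWalkA s1 s2 bt fuel (i - 1) (j - 1)
        (acc ++ [if s1.getD (i - 1) ' ' = s2.getD (j - 1) ' ' then "M" else "X"])
    else if pvMget "" bt i j = "U" then
      pvWalkA s1 s2 bt fuel (i - 1) j (acc ++ ["D"])
    else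
      pvWalkA s1 s2 bt fuel i (j - 1) (acc ++ ["I"])

def semi_global_alignment (str1 : String) (str2 : String) : Int × String :=
  let s1 := str1.toList
  let s2 := str2.toList
  let rows := s1.length + 1
  let cols := s2.length + 1
  let st := pvFillA s1 s2
  let max_j := pvArgmaxA (st.1.getD (rows - 1) []) cols
  let cigar := pvWalkA s1 s2 st.2 ((rows - 1) + max_j) (rows - 1) max_j []
  (pvMget 0 st.1 (rows - 1) max_j, PySem.Str.join "" cigar.reverse)

-- ===== PORT B =====
-- row 0 of B: [(-2*j, 'I'*j) for j in range(m+1)]   ('I'*j ported as replicate, exact)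
def pvRow0Balt (m : Nat) : List (Int × String) :=
  (List.range (m + 1)).map (fun (j : Nat) => (-2 * (j : Int), String.ofList (List.replicate j 'I')))

-- B's inner loop: build row i of (score, cigar) cells from the previous row
def pvRowBalt (s2 : List Char) (i : Nat) (c1 : Char) (prev : List (Int × String)) :
    List (Int × String) :=
  (List.range' 1 s2.length).foldl (fun cur j =>
    let eq := c1 = s2.getD (j - 1) ' '
    let mtch := (prev.getD (j - 1) (0, "")).1 + (if eq then 1 else -1)
    let del := (prev.getD j (0, "")).1 - 2
    let ins := (cur.getD (j - 1) (0, "")).1 - 2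
    if mtch ≥ del ∧ mtch ≥ ins then
      cur ++ [(mtch, (prev.getD (j - 1) (0, "")).2 ++ (if eq then "M" else "X"))]
    else if del ≥ ins then
      cur ++ [(del, (prev.getD j (0, "")).2 ++ "D")]
    else
      cur ++ [(ins, (cur.getD (j - 1) (0, "")).2 ++ "I")])
    [(0, String.ofList (List.replicate i 'D'))]

-- B's outer loop: only the previous row is kept
def pvLastRowBalt (s1 s2 : List Char) : List (Int × String) :=
  (List.range' 1 s1.length).foldl
    (fun prev i => pvRowBalt s2 i (s1.getD (i - 1) ' ') prev) (pvRow0Balt s2.length)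

def semi_global_alignment_alt (str1 : String) (str2 : String) : Int × String :=
  let last := pvLastRowBalt str1.toList str2.toList
  (last.drop 1).foldl (fun b cell => if cell.1 > b.1 then cell else b) (last.getD 0 (0, ""))

-- ===== PRECONDITION & SPEC =====
def Spec_semi_global_alignment (str1 : String) (str2 : String) (out : Int × String) : Prop := out = semi_global_alignment_alt str1 str2
instance (str1 : String) (str2 : String) (out : Int × String) : Decidable (Spec_semi_global_alignment str1 str2 out) := by unfold Spec_semi_global_alignment; infer_instance

-- ===== CLAIM (what is proved, stated in full; the proofs are below) =====
def Claim_equal_semi_global_alignment : Prop := ∀ (str1 : String) (str2 : String), Dom_semi_global_alignment str1 str2 → Spec_semi_global_alignment str1 str2 (semi_global_alignment str1 str2)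

-- ===== LEMMAS AND PROOFS =====

-- the common DP recurrence (semi-global alignment score)
def pvM (s1 s2 : List Char) : Nat → Nat → Int
  | 0, 0 => 0
  | 0, j + 1 => pvM s1 s2 0 j - 2
  | _ + 1, 0 => 0
  | i + 1, j + 1 =>
    let mtch := pvM s1 s2 i j + (if s1.getD i ' ' = s2.getD j ' ' then 1 else -1)
    max mtch (max (pvM s1 s2 i (j + 1) - 2) (pvM s1 s2 (i + 1) j - 2))
  termination_by i j => (i, j)

-- the direction A stores at an interior cell (a ≥ 1, b ≥ 1)
def pvBt (s1 s2 : List Char) (a b : Nat) : String :=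
  let mtch := pvM s1 s2 (a - 1) (b - 1) +
    (if s1.getD (a - 1) ' ' = s2.getD (b - 1) ' ' then 1 else -1)
  if pvM s1 s2 a b = mtch then "D"
  else if pvM s1 s2 a b = pvM s1 s2 (a - 1) b - 2 then "U" else "L"

-- A's traceback move list from (i,j), in emission order (the cigar is its reverse)
def pvR (s1 s2 : List Char) : Nat → Nat → Nat → List Char
  | 0, _, _ => []
  | fuel + 1, i, j =>
    if i = 0 ∧ j = 0 then []
    else if i = 0 then 'I' :: pvR s1 s2 fuel i (j - 1)
    else if j = 0 then 'D' :: pvR s1 s2 fuel (i - 1) j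
    else
      let d := pvM s1 s2 (i - 1) (j - 1) +
        (if s1.getD (i - 1) ' ' = s2.getD (j - 1) ' ' then 1 else -1)
      if pvM s1 s2 i j = d then
        (if s1.getD (i - 1) ' ' = s2.getD (j - 1) ' ' then 'M' else 'X') :: pvR s1 s2 fuel (i - 1) (j - 1)
      else if pvM s1 s2 i j = pvM s1 s2 (i - 1) j - 2 then 'D' :: pvR s1 s2 fuel (i - 1) j
      else 'I' :: pvR s1 s2 fuel i (j - 1)

-- B's forward-carried cigar at cell (i,j), as a char list
def pvC (s1 s2 : List Char) : Nat → Nat → List Char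
  | 0, 0 => []
  | 0, j + 1 => pvC s1 s2 0 j ++ ['I']
  | i + 1, 0 => pvC s1 s2 i 0 ++ ['D']
  | i + 1, j + 1 =>
    let eq := s1.getD i ' ' = s2.getD j ' '
    let mtch := pvM s1 s2 i j + (if eq then 1 else -1)
    let del := pvM s1 s2 i (j + 1) - 2
    let ins := pvM s1 s2 (i + 1) j - 2
    if mtch ≥ del ∧ mtch ≥ ins then pvC s1 s2 i j ++ [if eq then 'M' else 'X']
    else if del ≥ ins then pvC s1 s2 i (j + 1) ++ ['D']
    else pvC s1 s2 (i + 1) j ++ ['I']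
  termination_by i j => (i, j)

def pvRect {α : Type} (r c : Nat) (m : List (List α)) : Prop :=
  m.length = r ∧ ∀ row ∈ m, row.length = c

theorem pv_foldl_range'_inv {α : Type} (P : Nat → α → Prop) (f : α → Nat → α)
    (s len : Nat) (a : α) (h0 : P s a)
    (hstep : ∀ k b, s ≤ k → k < s + len → P k b → P (k + 1) (f b k)) :
    P (s + len) ((List.range' s len).foldl f a) := by
  induction len generalizing s a with
  | zero => simpa using h0
  | succ l ih =>
    have h : (List.range' s (l+1)) = s :: List.range' (s+1) l := by
      simp [List.range'_succ]
    rw [h]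
    simp only [List.foldl_cons]
    have := ih (s+1) (f a s) (hstep s a le_rfl (by omega) h0)
      (fun k b hk1 hk2 hb => hstep k b (by omega) (by omega) hb)
    have harith : s + 1 + l = s + (l + 1) := by omega
    rwa [harith] at this

theorem pv_getD_set_self {α : Type} (l : List α) (i : Nat) (v d : α) (h : i < l.length) :
    (l.set i v).getD i d = v := by
  simp [List.getD_eq_getElem?_getD, h]

theorem pv_getD_set_ne {α : Type} (l : List α) (i k : Nat) (v d : α) (h : i ≠ k) :
    (l.set i v).getD k d = l.getD k d := by
  simp [List.getD_eq_getElem?_getD, List.getElem?_set_ne h]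

theorem pv_getD_map_range {α : Type} (f : Nat → α) (k b : Nat) (d : α) :
    (((List.range k).map f).getD b d) = if b < k then f b else d := by
  rcases Nat.lt_or_ge b k with h | h
  · rw [List.getD_eq_getElem ((List.range k).map f) d (by simpa using h)]
    simp [h]
  · rw [List.getD_eq_default _ _ (by simpa using h)]
    simp [Nat.not_lt.mpr h]

theorem pvM_zero_zero (s1 s2 : List Char) : pvM s1 s2 0 0 = 0 := by simp [pvM]

theorem pvM_zero_left (s1 s2 : List Char) (i : Nat) : pvM s1 s2 i 0 = 0 := by
  cases i <;> simp [pvM]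

theorem pvM_succ_succ (s1 s2 : List Char) (i j : Nat) :
    pvM s1 s2 (i+1) (j+1) =
      max (pvM s1 s2 i j + (if s1.getD i ' ' = s2.getD j ' ' then 1 else -1))
        (max (pvM s1 s2 i (j+1) - 2) (pvM s1 s2 (i+1) j - 2)) := by
  simp [pvM]

theorem pvM_zero_row (s1 s2 : List Char) (j : Nat) : pvM s1 s2 0 j = -2 * (j : Int) := by
  induction j with
  | zero => simp [pvM]
  | succ k ih => simp [pvM, ih]; ring

theorem pvC_zero_row (s1 s2 : List Char) (j : Nat) : pvC s1 s2 0 j = List.replicate j 'I' := by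
  induction j with
  | zero => simp [pvC]
  | succ k ih => rw [pvC, ih, List.replicate_succ']

theorem pvC_zero_col (s1 s2 : List Char) (i : Nat) : pvC s1 s2 i 0 = List.replicate i 'D' := by
  induction i with
  | zero => simp [pvC]
  | succ k ih => rw [pvC, ih, List.replicate_succ']

-- the three-way max as a disjunction, to compare A's equality tests with B's ≥ tests
theorem pv_max3_cases (a b c : Int) :
    max a (max b c) = a ∨ max a (max b c) = b ∨ max a (max b c) = c := by
  rcases max_choice a (max b c) with h | h
  · exact Or.inl h
  · rcases max_choice b c with h2 | h2
    · exact Or.inr (Or.inl (h.trans h2))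
    · exact Or.inr (Or.inr (h.trans h2))

-- A's traceback (reversed) is exactly B's forward-carried cigar
theorem pvR_rev (s1 s2 : List Char) :
    ∀ fuel i j, i + j ≤ fuel → (pvR s1 s2 fuel i j).reverse = pvC s1 s2 i j := by
  intro fuel
  induction fuel with
  | zero =>
    intro i j h
    obtain ⟨rfl, rfl⟩ : i = 0 ∧ j = 0 := by omega
    simp [pvR, pvC]
  | succ f ih =>
    intro i j h
    by_cases h00 : i = 0 ∧ j = 0
    · obtain ⟨rfl, rfl⟩ := h00
      simp [pvR, pvC]
    · rcases Nat.eq_zero_or_pos i with rfl | hipos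
      · obtain ⟨j0, rfl⟩ : ∃ j0, j = j0 + 1 := ⟨j - 1, by omega⟩
        rw [pvR, if_neg h00, if_pos rfl]
        simp only [Nat.add_sub_cancel, List.reverse_cons]
        rw [ih 0 j0 (by omega), pvC]
      · rcases Nat.eq_zero_or_pos j with rfl | hjpos
        · obtain ⟨i0, rfl⟩ : ∃ i0, i = i0 + 1 := ⟨i - 1, by omega⟩
          rw [pvR, if_neg h00, if_neg (by omega), if_pos rfl]
          simp only [Nat.add_sub_cancel, List.reverse_cons]
          rw [ih i0 0 (by omega), pvC]
        · obtain ⟨i0, rfl⟩ : ∃ i0, i = i0 + 1 := ⟨i - 1, by omega⟩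
          obtain ⟨j0, rfl⟩ : ∃ j0, j = j0 + 1 := ⟨j - 1, by omega⟩
          rw [pvR, if_neg h00, if_neg (by omega), if_neg (by omega)]
          simp only [Nat.add_sub_cancel]
          rw [pvC]
          set mtch := pvM s1 s2 i0 j0 + (if s1.getD i0 ' ' = s2.getD j0 ' ' then 1 else -1) with hm
          set del := pvM s1 s2 i0 (j0+1) - 2 with hd
          set ins := pvM s1 s2 (i0+1) j0 - 2 with hi
          have hmax : pvM s1 s2 (i0+1) (j0+1) = max mtch (max del ins) :=
            pvM_succ_succ s1 s2 i0 j0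
          have hc := pv_max3_cases mtch del ins
          have h1 : max mtch (max del ins) ≥ mtch := le_max_left _ _
          have h2 : max mtch (max del ins) ≥ del :=
            le_trans (le_max_left _ _) (le_max_right _ _)
          have h3 : max mtch (max del ins) ≥ ins :=
            le_trans (le_max_right _ _) (le_max_right _ _)
          by_cases hb1 : mtch ≥ del ∧ mtch ≥ ins
          · rw [if_pos (show pvM s1 s2 (i0+1) (j0+1) = mtch by omega), if_pos hb1]
            simp only [List.reverse_cons]
            rw [ih i0 j0 (by omega)]
          · rw [if_neg (show ¬ pvM s1 s2 (i0+1) (j0+1) = mtch by omega), if_neg hb1]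
            by_cases hb2 : del ≥ ins
            · rw [if_pos (show pvM s1 s2 (i0+1) (j0+1) = del by omega), if_pos hb2]
              simp only [List.reverse_cons]
              rw [ih i0 (j0+1) (by omega)]
            · rw [if_neg (show ¬ pvM s1 s2 (i0+1) (j0+1) = del by omega), if_neg hb2]
              simp only [List.reverse_cons]
              rw [ih (i0+1) j0 (by omega)]

-- B's row specification
def pvRowSpec (s1 s2 : List Char) (i : Nat) : List (Int × String) :=
  (List.range (s2.length + 1)).map
    (fun j => (pvM s1 s2 i j, String.ofList (pvC s1 s2 i j)))

theorem pvRowBalt_spec (s1 s2 : List Char) (i0 : Nat) :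
    pvRowBalt s2 (i0+1) (s1.getD i0 ' ') (pvRowSpec s1 s2 i0) = pvRowSpec s1 s2 (i0+1) := by
  have hprev : ∀ b, b ≤ s2.length →
      (pvRowSpec s1 s2 i0).getD b (0, "") = (pvM s1 s2 i0 b, String.ofList (pvC s1 s2 i0 b)) := by
    intro b hb
    unfold pvRowSpec
    rw [pv_getD_map_range, if_pos (by omega)]
  unfold pvRowBalt
  have key := pv_foldl_range'_inv
    (fun k cur => cur = (List.range k).map
      (fun j => (pvM s1 s2 (i0+1) j, String.ofList (pvC s1 s2 (i0+1) j))))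
    (fun cur j =>
      let eq := s1.getD i0 ' ' = s2.getD (j - 1) ' '
      let mtch := ((pvRowSpec s1 s2 i0).getD (j - 1) (0, "")).1 + (if eq then 1 else -1)
      let del := ((pvRowSpec s1 s2 i0).getD j (0, "")).1 - 2
      let ins := (cur.getD (j - 1) (0, "")).1 - 2
      if mtch ≥ del ∧ mtch ≥ ins then
        cur ++ [(mtch, ((pvRowSpec s1 s2 i0).getD (j - 1) (0, "")).2 ++ (if eq then "M" else "X"))]
      else if del ≥ ins then
        cur ++ [(del, ((pvRowSpec s1 s2 i0).getD j (0, "")).2 ++ "D")]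
      else
        cur ++ [(ins, (cur.getD (j - 1) (0, "")).2 ++ "I")])
    1 s2.length [(0, String.ofList (List.replicate (i0+1) 'D'))]
    (by simp [List.range_succ, pvM_zero_left, pvC_zero_col])
    ?_
  · rw [show (1 : Nat) + s2.length = s2.length + 1 by omega] at key
    unfold pvRowSpec
    exact key
  · intro k cur hk1 hk2 hcur
    subst hcur
    obtain ⟨k0, rfl⟩ : ∃ k0, k = k0 + 1 := ⟨k - 1, by omega⟩
    simp only [Nat.add_sub_cancel]
    rw [hprev k0 (by omega), hprev (k0+1) (by omega), pv_getD_map_range,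
      if_pos (Nat.lt_succ_self k0)]
    simp only []
    conv_rhs => rw [List.range_succ, List.map_append]
    simp only [List.map_cons, List.map_nil]
    rw [show pvC s1 s2 (i0+1) (k0+1) =
      (let eq := s1.getD i0 ' ' = s2.getD k0 ' '
       let mtch := pvM s1 s2 i0 k0 + (if eq then 1 else -1)
       let del := pvM s1 s2 i0 (k0+1) - 2
       let ins := pvM s1 s2 (i0+1) k0 - 2
       if mtch ≥ del ∧ mtch ≥ ins then pvC s1 s2 i0 k0 ++ [if eq then 'M' else 'X']
       else if del ≥ ins then pvC s1 s2 i0 (k0+1) ++ ['D']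
       else pvC s1 s2 (i0+1) k0 ++ ['I']) from by rw [pvC]]
    simp only []
    set mtch := pvM s1 s2 i0 k0 + (if s1.getD i0 ' ' = s2.getD k0 ' ' then 1 else -1) with hmtch
    set del := pvM s1 s2 i0 (k0+1) - 2 with hdel
    set ins := pvM s1 s2 (i0+1) k0 - 2 with hins
    have hmax := pvM_succ_succ s1 s2 i0 k0
    rw [← hmtch, ← hdel, ← hins] at hmax
    have hc := pv_max3_cases mtch del ins
    have h1 : max mtch (max del ins) ≥ mtch := le_max_left _ _
    have h2 : max mtch (max del ins) ≥ del := le_trans (le_max_left _ _) (le_max_right _ _)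
    have h3 : max mtch (max del ins) ≥ ins := le_trans (le_max_right _ _) (le_max_right _ _)
    by_cases hb1 : mtch ≥ del ∧ mtch ≥ ins
    · have hmeq : pvM s1 s2 (i0+1) (k0+1) = mtch := by rw [hmax]; omega
      rw [if_pos hb1, if_pos hb1, hmeq]
      by_cases hch : s1.getD i0 ' ' = s2.getD k0 ' '
      · rw [if_pos hch, if_pos hch]
        simp [show ("M" : String) = String.ofList ['M'] from rfl]
      · rw [if_neg hch, if_neg hch]
        simp [show ("X" : String) = String.ofList ['X'] from rfl]
    · rw [if_neg hb1, if_neg hb1]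
      by_cases hb2 : del ≥ ins
      · have hmeq : pvM s1 s2 (i0+1) (k0+1) = del := by rw [hmax]; omega
        rw [if_pos hb2, if_pos hb2, hmeq]
        simp [show ("D" : String) = String.ofList ['D'] from rfl]
      · have hmeq : pvM s1 s2 (i0+1) (k0+1) = ins := by rw [hmax]; omega
        rw [if_neg hb2, if_neg hb2, hmeq]
        simp [show ("I" : String) = String.ofList ['I'] from rfl]

theorem pvLastRowBalt_spec (s1 s2 : List Char) :
    pvLastRowBalt s1 s2 = pvRowSpec s1 s2 s1.length := by
  unfold pvLastRowBalt
  have := pv_foldl_range'_inv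
    (fun k prev => prev = pvRowSpec s1 s2 (k - 1))
    (fun prev i => pvRowBalt s2 i (s1.getD (i - 1) ' ') prev)
    1 s1.length (pvRow0Balt s2.length)
    (by
      show pvRow0Balt s2.length = pvRowSpec s1 s2 (1 - 1)
      simp only [Nat.sub_self]
      unfold pvRow0Balt pvRowSpec
      apply List.map_congr_left
      intro j _
      rw [pvM_zero_row, pvC_zero_row])
    (by
      intro k prev hk1 hk2 hprev
      subst hprev
      obtain ⟨k0, rfl⟩ : ∃ k0, k = k0 + 1 := ⟨k - 1, by omega⟩
      simp only [Nat.add_sub_cancel]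
      exact pvRowBalt_spec s1 s2 k0)
  rw [show (1 : Nat) + s1.length = s1.length + 1 by omega] at this
  simpa using this

theorem pv_set_oob {α : Type} (l : List α) (i : Nat) (v : α) (h : l.length ≤ i) :
    l.set i v = l := by
  induction l generalizing i with
  | nil => rfl
  | cons x t ih =>
    cases i with
    | zero => simp at h
    | succ k => simp [List.set, ih k (by simpa using h)]

theorem pvRect_mset {α : Type} {r c : Nat} {m : List (List α)} (h : pvRect r c m)
    (i j : Nat) (v : α) : pvRect r c (pvMset m i j v) := by
  obtain ⟨h1, h2⟩ := h
  by_cases hi : i < m.length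
  · constructor
    · simp [pvMset, h1]
    · intro row hrow
      rcases List.mem_or_eq_of_mem_set hrow with hr | hr
      · exact h2 _ hr
      · subst hr
        rw [List.length_set, List.getD_eq_getElem m [] hi]
        exact h2 _ (List.getElem_mem hi)
  · unfold pvMset
    rw [pv_set_oob _ _ _ (by omega)]
    exact ⟨h1, h2⟩

theorem pvMget_mset_self {α : Type} {r c : Nat} {m : List (List α)} (h : pvRect r c m)
    {i j : Nat} (hi : i < r) (hj : j < c) (v d : α) :
    pvMget d (pvMset m i j v) i j = v := by
  obtain ⟨h1, h2⟩ := h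
  have hil : i < m.length := by omega
  have hrl : (m.getD i []).length = c := by
    rw [List.getD_eq_getElem m [] hil]
    exact h2 _ (List.getElem_mem hil)
  unfold pvMget pvMset
  rw [pv_getD_set_self _ _ _ _ hil, pv_getD_set_self _ _ _ _ (by omega)]

theorem pvMget_mset_ne {α : Type} (m : List (List α)) (i j a b : Nat) (v d : α)
    (hne : i ≠ a ∨ j ≠ b) :
    pvMget d (pvMset m i j v) a b = pvMget d m a b := by
  unfold pvMget pvMset
  rcases hne with hn | hn
  · rw [pv_getD_set_ne _ _ _ _ _ hn]
  · by_cases hia : i = a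
    · subst hia
      by_cases hil : i < m.length
      · rw [pv_getD_set_self _ _ _ _ hil, pv_getD_set_ne _ _ _ _ _ hn]
      · rw [pv_set_oob _ _ _ (by omega)]
    · rw [pv_getD_set_ne _ _ _ _ _ hia]

theorem pvMget_replicate {α : Type} (r c a b : Nat) (x : α) :
    pvMget x (List.replicate r (List.replicate c x)) a b = x := by
  unfold pvMget
  simp only [List.getD_eq_getElem?_getD, List.getElem?_replicate]
  by_cases h : a < r
  · simp only [if_pos h, Option.getD_some]
    by_cases h2 : b < c <;> simp [h2]
  · simp [h]

theorem pvRect_replicate {α : Type} (r c : Nat) (x : α) :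
    pvRect r c (List.replicate r (List.replicate c x)) := by
  constructor
  · simp
  · intro row hrow
    rw [List.eq_of_mem_replicate hrow]
    simp

theorem pvPhase1_spec (s1 s2 : List Char) :
    pvRect (s1.length+1) (s2.length+1) (pvPhase1 s1 s2).1 ∧
    pvRect (s1.length+1) (s2.length+1) (pvPhase1 s1 s2).2 ∧
    (∀ a b, pvMget 0 (pvPhase1 s1 s2).1 a b = 0) ∧
    (∀ a b, pvMget "" (pvPhase1 s1 s2).2 a b =
      if b = 0 ∧ 1 ≤ a ∧ a ≤ s1.length then "U" else "") := by
  unfold pvPhase1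
  have := pv_foldl_range'_inv
    (fun k (st : List (List Int) × List (List String)) =>
      pvRect (s1.length+1) (s2.length+1) st.1 ∧
      pvRect (s1.length+1) (s2.length+1) st.2 ∧
      (∀ a b, pvMget 0 st.1 a b = 0) ∧
      (∀ a b, pvMget "" st.2 a b = if b = 0 ∧ 1 ≤ a ∧ a < k then "U" else ""))
    pvLoop1 1 s1.length (pvMat0 s1 s2)
    (by
      simp only [pvMat0]
      refine ⟨pvRect_replicate _ _ _, pvRect_replicate _ _ _, ?_, ?_⟩
      · intro a b; exact pvMget_replicate _ _ _ _ _
      · intro a b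
        rw [pvMget_replicate]
        split
        · omega
        · rfl)
    (by
      intro k st hk1 hk2 ⟨hr1, hr2, hm, hb⟩
      simp only [pvLoop1]
      refine ⟨pvRect_mset hr1 _ _ _, pvRect_mset hr2 _ _ _, ?_, ?_⟩
      · intro a b
        by_cases hab : k = a ∧ 0 = b
        · obtain ⟨rfl, rfl⟩ := hab
          exact pvMget_mset_self hr1 (by omega) (by omega) _ _
        · rw [pvMget_mset_ne _ _ _ _ _ _ _ (by tauto)]
          exact hm a b
      · intro a b
        by_cases hab : k = a ∧ 0 = b
        · obtain ⟨rfl, rfl⟩ := hab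
          rw [pvMget_mset_self hr2 (by omega) (by omega)]
          split
          · rfl
          · omega
        · rw [pvMget_mset_ne _ _ _ _ _ _ _ (by tauto)]
          rw [hb a b]
          by_cases h0 : b = 0 ∧ 1 ≤ a ∧ a < k
          · rw [if_pos h0, if_pos (by omega)]
          · rw [if_neg h0, if_neg (by omega)])
  obtain ⟨h1, h2, h3, h4⟩ := this
  refine ⟨h1, h2, h3, ?_⟩
  intro a b
  rw [h4 a b]
  by_cases h0 : b = 0 ∧ 1 ≤ a ∧ a < 1 + s1.length
  · rw [if_pos h0, if_pos (by omega)]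
  · rw [if_neg h0, if_neg (by omega)]

theorem pvPhase2_spec (s1 s2 : List Char) :
    pvRect (s1.length+1) (s2.length+1) (pvPhase2 s1 s2).1 ∧
    pvRect (s1.length+1) (s2.length+1) (pvPhase2 s1 s2).2 ∧
    (∀ a b, pvMget 0 (pvPhase2 s1 s2).1 a b =
      if a = 0 ∧ b ≤ s2.length then pvM s1 s2 0 b else 0) ∧
    (∀ a b, pvMget "" (pvPhase2 s1 s2).2 a b =
      if b = 0 ∧ 1 ≤ a ∧ a ≤ s1.length then "U"
      else if a = 0 ∧ 1 ≤ b ∧ b ≤ s2.length then "L" else "") := by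
  unfold pvPhase2
  obtain ⟨hp1, hp2, hp3, hp4⟩ := pvPhase1_spec s1 s2
  have := pv_foldl_range'_inv
    (fun k (st : List (List Int) × List (List String)) =>
      pvRect (s1.length+1) (s2.length+1) st.1 ∧
      pvRect (s1.length+1) (s2.length+1) st.2 ∧
      (∀ a b, pvMget 0 st.1 a b = if a = 0 ∧ b < k then pvM s1 s2 0 b else 0) ∧
      (∀ a b, pvMget "" st.2 a b =
        if b = 0 ∧ 1 ≤ a ∧ a ≤ s1.length then "U"
        else if a = 0 ∧ 1 ≤ b ∧ b < k then "L" else ""))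
    pvLoop2 1 s2.length (pvPhase1 s1 s2)
    (by
      refine ⟨hp1, hp2, ?_, ?_⟩
      · intro a b
        rw [hp3 a b]
        by_cases h0 : a = 0 ∧ b < 1
        · rw [if_pos h0]
          obtain ⟨_, hb⟩ := h0
          obtain rfl : b = 0 := by omega
          rw [pvM_zero_zero]
        · rw [if_neg h0]
      · intro a b
        rw [hp4 a b]
        by_cases h0 : b = 0 ∧ 1 ≤ a ∧ a ≤ s1.length
        · rw [if_pos h0, if_pos h0]
        · rw [if_neg h0, if_neg h0, if_neg (by omega)])
    (by
      intro k st hk1 hk2 ⟨hr1, hr2, hm, hb⟩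
      obtain ⟨k', rfl⟩ : ∃ k', k = k' + 1 := ⟨k - 1, by omega⟩
      simp only [pvLoop2]
      have hread : pvMget 0 st.1 0 (k' + 1 - 1) = pvM s1 s2 0 k' := by
        rw [hm]
        simp
      refine ⟨pvRect_mset hr1 _ _ _, pvRect_mset hr2 _ _ _, ?_, ?_⟩
      · intro a b
        by_cases hab : 0 = a ∧ k' + 1 = b
        · obtain ⟨rfl, rfl⟩ := hab
          rw [pvMget_mset_self hr1 (by omega) (by omega)]
          rw [if_pos (by omega), hread]
          rw [show pvM s1 s2 0 (k' + 1) = pvM s1 s2 0 k' - 2 from by simp [pvM]]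
        · rw [pvMget_mset_ne _ _ _ _ _ _ _ (by tauto)]
          rw [hm a b]
          by_cases h0 : a = 0 ∧ b < k' + 1
          · rw [if_pos h0, if_pos (by omega)]
          · rw [if_neg h0, if_neg (by omega)]
      · intro a b
        by_cases hab : 0 = a ∧ k' + 1 = b
        · obtain ⟨rfl, rfl⟩ := hab
          rw [pvMget_mset_self hr2 (by omega) (by omega)]
          rw [if_neg (by omega), if_pos (by omega)]
        · rw [pvMget_mset_ne _ _ _ _ _ _ _ (by tauto)]
          rw [hb a b]
          by_cases h0 : b = 0 ∧ 1 ≤ a ∧ a ≤ s1.length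
          · rw [if_pos h0, if_pos h0]
          · rw [if_neg h0, if_neg h0]
            by_cases h1 : a = 0 ∧ 1 ≤ b ∧ b < k' + 1
            · rw [if_pos h1, if_pos (by omega)]
            · rw [if_neg h1, if_neg (by omega)])
  obtain ⟨h1, h2, h3, h4⟩ := this
  refine ⟨h1, h2, ?_, ?_⟩
  · intro a b
    rw [h3 a b]
    by_cases h0 : a = 0 ∧ b < 1 + s2.length
    · rw [if_pos h0, if_pos (by omega)]
    · rw [if_neg h0, if_neg (by omega)]
  · intro a b
    rw [h4 a b]
    by_cases h0 : b = 0 ∧ 1 ≤ a ∧ a ≤ s1.length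
    · rw [if_pos h0, if_pos h0]
    · rw [if_neg h0, if_neg h0]
      by_cases h1 : a = 0 ∧ 1 ≤ b ∧ b < 1 + s2.length
      · rw [if_pos h1, if_pos (by omega)]
      · rw [if_neg h1, if_neg (by omega)]

-- fillA correctness
theorem pvFillA_spec (s1 s2 : List Char) :
    pvRect (s1.length+1) (s2.length+1) (pvFillA s1 s2).1 ∧
    (∀ a b, a ≤ s1.length → b ≤ s2.length →
      pvMget 0 (pvFillA s1 s2).1 a b = pvM s1 s2 a b) ∧
    (∀ a, 1 ≤ a → a ≤ s1.length → pvMget "" (pvFillA s1 s2).2 a 0 = "U") ∧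
    (∀ b, 1 ≤ b → b ≤ s2.length → pvMget "" (pvFillA s1 s2).2 0 b = "L") ∧
    (∀ a b, 1 ≤ a → a ≤ s1.length → 1 ≤ b → b ≤ s2.length →
      pvMget "" (pvFillA s1 s2).2 a b = pvBt s1 s2 a b) := by
  unfold pvFillA
  obtain ⟨hp1, hp2, hp3, hp4⟩ := pvPhase2_spec s1 s2
  have hout := pv_foldl_range'_inv
    (fun k (st : List (List Int) × List (List String)) =>
      pvRect (s1.length+1) (s2.length+1) st.1 ∧
      pvRect (s1.length+1) (s2.length+1) st.2 ∧
      (∀ a b, a ≤ s1.length → b ≤ s2.length → (a = 0 ∨ b = 0 ∨ a < k) →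
        pvMget 0 st.1 a b = pvM s1 s2 a b) ∧
      (∀ a, 1 ≤ a → a ≤ s1.length → pvMget "" st.2 a 0 = "U") ∧
      (∀ b, 1 ≤ b → b ≤ s2.length → pvMget "" st.2 0 b = "L") ∧
      (∀ a b, 1 ≤ a → 1 ≤ b → b ≤ s2.length → (a < k) →
        pvMget "" st.2 a b = pvBt s1 s2 a b))
    (pvLoop3 s1 s2) 1 s1.length (pvPhase2 s1 s2)
    (by
      refine ⟨hp1, hp2, ?_, ?_, ?_, ?_⟩
      · intro a b ha hb hc
        rw [hp3 a b]
        by_cases h0 : a = 0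
        · rw [if_pos ⟨h0, hb⟩, h0]
        · rw [if_neg (by tauto)]
          obtain rfl : b = 0 := by omega
          rw [pvM_zero_left]
      · intro a h1 h2
        rw [hp4 a 0, if_pos ⟨rfl, h1, h2⟩]
      · intro b h1 h2
        rw [hp4 0 b, if_neg (by omega), if_pos ⟨rfl, h1, h2⟩]
      · intro a b h1 h2 h3 h4
        omega)
    (by
      intro k st hk1 hk2 ⟨hr1, hr2, hm, htU, htL, hbt⟩
      simp only [pvLoop3]
      have hin := pv_foldl_range'_inv
        (fun j (st : List (List Int) × List (List String)) =>
          pvRect (s1.length+1) (s2.length+1) st.1 ∧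
          pvRect (s1.length+1) (s2.length+1) st.2 ∧
          (∀ a b, a ≤ s1.length → b ≤ s2.length →
            (a = 0 ∨ b = 0 ∨ a < k ∨ (a = k ∧ b < j)) →
            pvMget 0 st.1 a b = pvM s1 s2 a b) ∧
          (∀ a, 1 ≤ a → a ≤ s1.length → pvMget "" st.2 a 0 = "U") ∧
          (∀ b, 1 ≤ b → b ≤ s2.length → pvMget "" st.2 0 b = "L") ∧
          (∀ a b, 1 ≤ a → 1 ≤ b → b ≤ s2.length → (a < k ∨ (a = k ∧ b < j)) →
            pvMget "" st.2 a b = pvBt s1 s2 a b))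
        (pvCell s1 s2 k) 1 s2.length st
        (by
          refine ⟨hr1, hr2, ?_, htU, htL, ?_⟩
          · intro a b ha hb hc
            exact hm a b ha hb (by omega)
          · intro a b h1 h2 h3 hc
            exact hbt a b h1 h2 h3 (by omega))
        (by
          intro j stj hj1 hj2 ⟨jr1, jr2, jm, jtU, jtL, jbt⟩
          simp only [pvCell]
          have hkn : k ≤ s1.length := by omega
          have hjm : j ≤ s2.length := by omega
          have e1 : pvMget 0 stj.1 (k-1) (j-1) = pvM s1 s2 (k-1) (j-1) :=
            jm _ _ (by omega) (by omega) (by omega)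
          have e2 : pvMget 0 stj.1 (k-1) j = pvM s1 s2 (k-1) j :=
            jm _ _ (by omega) (by omega) (by omega)
          have e3 : pvMget 0 stj.1 k (j-1) = pvM s1 s2 k (j-1) :=
            jm _ _ (by omega) (by omega) (by omega)
          rw [e1, e2, e3]
          obtain ⟨k0, rfl⟩ : ∃ k0, k = k0 + 1 := ⟨k - 1, by omega⟩
          obtain ⟨j0, rfl⟩ : ∃ j0, j = j0 + 1 := ⟨j - 1, by omega⟩
          simp only [Nat.add_sub_cancel]
          have hv : max (pvM s1 s2 k0 j0 +
                (if s1.getD k0 ' ' = s2.getD j0 ' ' then 1 else -1))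
              (max (pvM s1 s2 k0 (j0+1) - 2) (pvM s1 s2 (k0+1) j0 - 2)) =
              pvM s1 s2 (k0+1) (j0+1) := (pvM_succ_succ s1 s2 k0 j0).symm
          rw [hv]
          have hbtv : (if pvM s1 s2 (k0+1) (j0+1) =
                pvM s1 s2 k0 j0 + (if s1.getD k0 ' ' = s2.getD j0 ' ' then 1 else -1)
              then "D"
              else if pvM s1 s2 (k0+1) (j0+1) = pvM s1 s2 k0 (j0+1) - 2 then "U" else "L") =
              pvBt s1 s2 (k0+1) (j0+1) := by
            simp only [pvBt, Nat.add_sub_cancel]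
          rw [hbtv]
          refine ⟨pvRect_mset jr1 _ _ _, pvRect_mset jr2 _ _ _, ?_, ?_, ?_, ?_⟩
          · intro a b ha hb hc
            by_cases hab : a = k0 + 1 ∧ b = j0 + 1
            · obtain ⟨rfl, rfl⟩ := hab
              exact pvMget_mset_self jr1 (by omega) (by omega) _ _
            · rw [pvMget_mset_ne _ _ _ _ _ _ _ (by tauto)]
              exact jm a b ha hb (by omega)
          · intro a h1 h2
            rw [pvMget_mset_ne _ _ _ _ _ _ _ (by omega)]
            exact jtU a h1 h2
          · intro b h1 h2
            rw [pvMget_mset_ne _ _ _ _ _ _ _ (by omega)]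
            exact jtL b h1 h2
          · intro a b h1 h2 h3 hc
            by_cases hab : a = k0 + 1 ∧ b = j0 + 1
            · obtain ⟨rfl, rfl⟩ := hab
              rw [pvMget_mset_self jr2 (by omega) (by omega)]
            · rw [pvMget_mset_ne _ _ _ _ _ _ _ (by tauto)]
              exact jbt a b h1 h2 h3 (by omega))
      obtain ⟨ir1, ir2, im, itU, itL, ibt⟩ := hin
      refine ⟨ir1, ir2, ?_, itU, itL, ?_⟩
      · intro a b ha hb hc
        exact im a b ha hb (by omega)
      · intro a b h1 h2 h3 hc
        exact ibt a b h1 h2 h3 (by omega))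
  obtain ⟨fr1, fr2, fm, ftU, ftL, fbt⟩ := hout
  refine ⟨fr1, ?_, ftU, ftL, ?_⟩
  · intro a b ha hb
    exact fm a b ha hb (by omega)
  · intro a b h1 h2 h3 h4
    exact fbt a b h1 h3 h4 (by omega)

-- first-argmax of the last row: what A's max(range(cols), key=...) computes
theorem pvArgmaxA_spec (row : List Int) (m : Nat) (g : Nat → Int)
    (hrow : ∀ j, j ≤ m → row.getD j 0 = g j) :
    pvArgmaxA row (m + 1) ≤ m ∧
    (∀ t, t ≤ m → g t ≤ g (pvArgmaxA row (m + 1))) ∧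
    (∀ t, t < pvArgmaxA row (m + 1) → g t < g (pvArgmaxA row (m + 1))) := by
  unfold pvArgmaxA
  simp only [Nat.add_sub_cancel]
  have := pv_foldl_range'_inv
    (fun k (b : Nat) => b < k ∧ (∀ t, t < k → g t ≤ g b) ∧ (∀ t, t < b → g t < g b))
    (fun b j => if row.getD j 0 > row.getD b 0 then j else b)
    1 m 0
    (by
      refine ⟨by omega, ?_, by omega⟩
      intro t ht
      obtain rfl : t = 0 := by omega
      exact le_rfl)
    (by
      intro k b hk1 hk2 ⟨hb1, hb2, hb3⟩
      dsimp only
      rw [hrow k (by omega), hrow b (by omega)]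
      by_cases hgt : g b < g k
      · rw [if_pos hgt]
        refine ⟨by omega, ?_, ?_⟩
        · intro t ht
          rcases Nat.lt_or_ge t k with h | h
          · exact le_of_lt (lt_of_le_of_lt (hb2 t h) hgt)
          · obtain rfl : t = k := by omega
            exact le_rfl
        · intro t ht
          exact lt_of_le_of_lt (hb2 t ht) hgt
      · rw [if_neg (by simpa using hgt)]
        refine ⟨by omega, ?_, hb3⟩
        intro t ht
        rcases Nat.lt_or_ge t k with h | h
        · exact hb2 t h
        · obtain rfl : t = k := by omega
          omega)
  obtain ⟨h1, h2, h3⟩ := this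
  exact ⟨by omega, fun t ht => h2 t (by omega), h3⟩

-- B's strict-> scan over the last row picks exactly the first argmax cell
theorem pvSelB_spec (f : Nat → Int × String) (g : Nat → Int) (m : Nat)
    (hf : ∀ j, j ≤ m → (f j).1 = g j) (bstar : Nat) (hb1 : bstar ≤ m)
    (hb2 : ∀ t, t ≤ m → g t ≤ g bstar) (hb3 : ∀ t, t < bstar → g t < g bstar) :
    ((List.range' 1 m).map f).foldl (fun b cell => if cell.1 > b.1 then cell else b) (f 0) =
      f bstar := by
  rw [List.foldl_map]
  have := pv_foldl_range'_inv
    (fun k (x : Int × String) =>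
      ∃ b, b < k ∧ b ≤ m ∧ x = f b ∧ (∀ t, t < k → g t ≤ g b) ∧ (∀ t, t < b → g t < g b))
    (fun x j => if (f j).1 > x.1 then f j else x) 1 m (f 0)
    (by
      refine ⟨0, by omega, by omega, rfl, ?_, by omega⟩
      intro t ht
      obtain rfl : t = 0 := by omega
      exact le_rfl)
    (by
      intro k x hk1 hk2 ⟨b, hbk, hbm, hx, hle, hlt⟩
      subst hx
      dsimp only
      rw [hf k (by omega), hf b hbm]
      by_cases hgt : g b < g k
      · rw [if_pos hgt]
        refine ⟨k, by omega, by omega, rfl, ?_, ?_⟩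
        · intro t ht
          rcases Nat.lt_or_ge t k with h | h
          · exact le_of_lt (lt_of_le_of_lt (hle t h) hgt)
          · obtain rfl : t = k := by omega
            exact le_rfl
        · intro t ht
          exact lt_of_le_of_lt (hle t ht) hgt
      · rw [if_neg (by simpa using hgt)]
        refine ⟨b, by omega, hbm, rfl, ?_, hlt⟩
        intro t ht
        rcases Nat.lt_or_ge t k with h | h
        · exact hle t h
        · obtain rfl : t = k := by omega
          omega)
  obtain ⟨b, hbk, hbm, hx, hle, hlt⟩ := this
  rw [hx]
  congr 1
  have hgeq : g b = g bstar := by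
    have h1 : g bstar ≤ g b := hle bstar (by omega)
    have h2 : g b ≤ g bstar := hb2 b hbm
    omega
  by_contra hne
  rcases Nat.lt_or_ge b bstar with h | h
  · have := hb3 b h
    omega
  · have hlt2 : bstar < b := by omega
    have := hlt bstar hlt2
    omega

theorem pv_join_singletons (l : List Char) :
    PySem.Str.join "" ((l.map (fun c => String.ofList [c])).reverse) = String.ofList l.reverse := by
  rw [← List.map_reverse]
  apply String.toList_inj.mp
  simp only [PySem.Str.toList_join, List.map_map]
  have h : (List.map (String.toList ∘ fun c => String.ofList [c]) l.reverse) =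
      l.reverse.map (fun c => [c]) := by
    apply List.map_congr_left
    intro a _
    simp
  rw [h, show ("" : String).toList = [] from rfl, PySem.Chars.join_nil_singletons l.reverse]
  simp

-- the two walks: A's bt-driven walk emits exactly pvR (interior bt cells = pvBt, borders U/L)
theorem pvWalkA_spec (s1 s2 : List Char) (bt : List (List String))
    (hU : ∀ a, 1 ≤ a → a ≤ s1.length → pvMget "" bt a 0 = "U")
    (hL : ∀ b, 1 ≤ b → b ≤ s2.length → pvMget "" bt 0 b = "L")
    (hD : ∀ a b, 1 ≤ a → a ≤ s1.length → 1 ≤ b → b ≤ s2.length →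
      pvMget "" bt a b = pvBt s1 s2 a b) :
    ∀ fuel i j acc, i ≤ s1.length → j ≤ s2.length →
      pvWalkA s1 s2 bt fuel i j acc =
        acc ++ (pvR s1 s2 fuel i j).map (fun c => String.ofList [c]) := by
  have hLD : ("L" : String) ≠ "D" := by decide
  have hLU : ("L" : String) ≠ "U" := by decide
  have hUD : ("U" : String) ≠ "D" := by decide
  intro fuel
  induction fuel with
  | zero => intro i j acc _ _; simp [pvWalkA, pvR]
  | succ f ih =>
    intro i j acc hi hj
    by_cases h00 : i = 0 ∧ j = 0
    · unfold pvWalkA pvR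
      rw [if_pos h00, if_pos h00]
      simp
    · rcases Nat.eq_zero_or_pos i with rfl | hipos
      · have hj1 : 1 ≤ j := by omega
        have hbt := hL j hj1 hj
        unfold pvWalkA pvR
        rw [if_neg h00, hbt, if_neg hLD, if_neg hLU, if_neg h00, if_pos rfl]
        rw [ih 0 (j-1) _ (by omega) (by omega)]
        simp [show String.ofList ['I'] = "I" from rfl]
      · rcases Nat.eq_zero_or_pos j with rfl | hjpos
        · have hbt := hU i hipos hi
          unfold pvWalkA pvR
          rw [if_neg h00, hbt, if_neg hUD, if_pos rfl, if_neg h00,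
            if_neg (by omega : ¬ i = 0), if_pos rfl]
          rw [ih (i-1) 0 _ (by omega) (by omega)]
          simp [show String.ofList ['D'] = "D" from rfl]
        · have hbt := hD i j hipos hi hjpos hj
          simp only [pvBt] at hbt
          unfold pvWalkA pvR
          rw [if_neg h00, hbt, if_neg h00, if_neg (by omega : ¬ i = 0),
            if_neg (by omega : ¬ j = 0)]
          by_cases hc1 : pvM s1 s2 i j =
              pvM s1 s2 (i-1) (j-1) + (if s1.getD (i-1) ' ' = s2.getD (j-1) ' ' then 1 else -1)
          · rw [if_pos hc1, if_pos rfl, if_pos hc1]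
            rw [ih (i-1) (j-1) _ (by omega) (by omega)]
            by_cases hch : s1.getD (i-1) ' ' = s2.getD (j-1) ' '
            · rw [if_pos hch, if_pos hch]
              simp [show String.ofList ['M'] = "M" from rfl]
            · rw [if_neg hch, if_neg hch]
              simp [show String.ofList ['X'] = "X" from rfl]
          · rw [if_neg hc1, if_neg hc1]
            by_cases hc2 : pvM s1 s2 i j = pvM s1 s2 (i-1) j - 2
            · rw [if_pos hc2, if_neg hUD, if_pos rfl, if_pos hc2]
              rw [ih (i-1) j _ (by omega) (by omega)]
              simp [show String.ofList ['D'] = "D" from rfl]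
            · rw [if_neg hc2, if_neg hLD, if_neg hLU, if_neg hc2]
              rw [ih i (j-1) _ (by omega) (by omega)]
              simp [show String.ofList ['I'] = "I" from rfl]

-- ===== VERDICT (by name: the statement is the Claim_ definition above) =====
theorem semi_global_alignment_spec : Claim_equal_semi_global_alignment := by
  intro str1 str2 _
  unfold Spec_semi_global_alignment semi_global_alignment semi_global_alignment_alt
  dsimp only
  simp only [Nat.add_sub_cancel]
  generalize str1.toList = s1
  generalize str2.toList = s2
  obtain ⟨hrA, hmA, htU, htL, hbtA⟩ := pvFillA_spec s1 s2
  have hrowA : ∀ j, j ≤ s2.length →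
      ((pvFillA s1 s2).1.getD s1.length []).getD j 0 = pvM s1 s2 s1.length j :=
    fun j hj => hmA s1.length j le_rfl hj
  obtain ⟨hb1, hb2, hb3⟩ := pvArgmaxA_spec ((pvFillA s1 s2).1.getD s1.length [])
    s2.length (fun j => pvM s1 s2 s1.length j) hrowA
  set bstar := pvArgmaxA ((pvFillA s1 s2).1.getD s1.length []) (s2.length+1) with hbstar
  set f : Nat → Int × String :=
    fun j => (pvM s1 s2 s1.length j, String.ofList (pvC s1 s2 s1.length j)) with hf
  have hlast : pvLastRowBalt s1 s2 = (List.range (s2.length + 1)).map f :=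
    pvLastRowBalt_spec s1 s2
  have hsplit : (List.range (s2.length + 1)).map f = f 0 :: (List.range' 1 s2.length).map f := by
    rw [show List.range (s2.length + 1) = 0 :: List.range' 1 s2.length by
      simp [List.range_eq_range', List.range'_succ]]
    simp
  rw [hlast, hsplit]
  simp only [List.drop_succ_cons, List.drop_zero, List.getD_cons_zero]
  rw [pvSelB_spec f (fun j => pvM s1 s2 s1.length j) s2.length (fun j _ => rfl)
    bstar hb1 hb2 hb3]
  rw [hf]
  simp only []
  rw [hmA s1.length bstar le_rfl (by omega)]
  rw [pvWalkA_spec s1 s2 _ htU htL hbtA (s1.length + bstar) s1.length bstar [] le_rfl (by omega)]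
  simp only [List.nil_append]
  rw [pv_join_singletons, pvR_rev s1 s2 (s1.length + bstar) s1.length bstar le_rfl]
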